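-- pv_equiv track=rewrite | github.com/antoniodiiaz/AwD | AD_DRONE.py | separaDatos
-- ===== SOURCE A (Python) =====
-- def separaDatos(datos) -> list[str]:
--     res = []
--     cuantos = 0
--     for i,d in enumerate(datos):
--         if d == "#":
--             if cuantos == 0:
--                 res.append(datos[:i])
--                 j = i
--
--             elif cuantos > 0 or cuantos < 3:
--                 res.append(datos[j + 1 : i])
--                 j = i
--             cuantos += 1
--             if cuantos == 3:
--                 res.append(datos[i+1:])
--                 break
--     return res
-- ===== SOURCE B (Python) =====
-- def separaDatos(datos) -> list[str]:
--     parts = datos.split("#", 3)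
--     return parts if len(parts) == 4 else parts[:-1]
-- ===== Notes on version B (the rewrite author's own statement) =====
-- stated objective: simpler
-- what changed: Replaces the char-by-char scan with counter, recorded index and manual slicing by a single library split with maxsplit 3 plus a length-guarded slice that drops the incomplete trailing field when fewer than three separators occur.
import Mathlib
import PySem

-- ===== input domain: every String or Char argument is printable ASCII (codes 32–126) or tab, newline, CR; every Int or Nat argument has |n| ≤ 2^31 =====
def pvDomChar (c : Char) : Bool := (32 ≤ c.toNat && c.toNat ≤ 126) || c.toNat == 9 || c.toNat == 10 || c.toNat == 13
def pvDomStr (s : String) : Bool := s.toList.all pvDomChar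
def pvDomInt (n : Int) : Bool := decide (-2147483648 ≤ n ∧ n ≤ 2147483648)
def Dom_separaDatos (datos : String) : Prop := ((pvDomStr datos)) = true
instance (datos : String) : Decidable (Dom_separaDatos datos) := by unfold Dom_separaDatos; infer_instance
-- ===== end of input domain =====

-- ===== PORT A =====
-- B replaces A's manual scan/counter/slice loop by split('#', 3) plus a length-guarded
-- parts[:-1]; objective: simpler. Return values only; neither version mutates its argument.
def separaDatosGo (datos : String) : List (Int × Char) → List String → Int → Int → List String
  | [], res, _, _ => res
  | (i, d) :: rest, res, cuantos, j =>
    if d == '#' then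
      let rj : List String × Int :=
        if cuantos == 0 then (res ++ [PySem.Str.slice datos none (some i)], i)
        else if cuantos > 0 || cuantos < 3 then
          (res ++ [PySem.Str.slice datos (some (j + 1)) (some i)], i)
        else (res, j)
      let cuantos' := cuantos + 1
      if cuantos' == 3 then rj.1 ++ [PySem.Str.slice datos (some (i + 1)) none]
      else separaDatosGo datos rest rj.1 cuantos' rj.2
    else separaDatosGo datos rest res cuantos j

def separaDatos (datos : String) : List String :=
  separaDatosGo datos (PySem.List.enumerate datos.toList) [] 0 0

-- ===== PORT B =====
def separaDatos_alt (datos : String) : List String :=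
  let parts := (PySem.Str.splitMax? datos "#" 3).getD []
  if parts.length == 4 then parts else PySem.List.slice parts none (some (-1))

-- ===== PRECONDITION & SPEC =====
def Spec_separaDatos (datos : String) (out : List String) : Prop := out = separaDatos_alt datos
instance (datos : String) (out : List String) : Decidable (Spec_separaDatos datos out) := by unfold Spec_separaDatos; infer_instance

-- ===== CLAIM (what is proved, stated in full; the proofs are below) =====
def Claim_equal_separaDatos : Prop := ∀ (datos : String), Dom_separaDatos datos → Spec_separaDatos datos (separaDatos datos)

-- ===== LEMMAS AND PROOFS =====

-- splitOnMax.go with the budget exhausted returns the remainder as the last piece.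
theorem go_m_zero (fuel : Nat) (l : List Char) (acc : List (List Char)) :
    PySem.Chars.splitOnMax.go ['#'] fuel 0 l [] acc = (l :: acc).reverse := by
  cases fuel with
  | zero => simp [PySem.Chars.splitOnMax.go]
  | succ f => cases l with
    | nil => simp [PySem.Chars.splitOnMax.go]
    | cons c r => simp [PySem.Chars.splitOnMax.go]

-- The number of pieces splitOnMax.go produces.
theorem go_length (fuel : Nat) (l : List Char) (m : Nat) (cur : List Char) (acc : List (List Char))
    (hf : l.length < fuel) :
    (PySem.Chars.splitOnMax.go ['#'] fuel m l cur acc).length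
      = acc.length + 1 + min m (l.count '#') := by
  induction fuel generalizing l m cur acc with
  | zero => omega
  | succ f ih =>
    cases l with
    | nil => simp [PySem.Chars.splitOnMax.go]
    | cons c r =>
      by_cases hm : m = 0
      · subst hm; simp [PySem.Chars.splitOnMax.go]
      · by_cases hc : c = '#'
        · subst hc
          rw [show PySem.Chars.splitOnMax.go ['#'] (f + 1) m ('#' :: r) cur acc
              = PySem.Chars.splitOnMax.go ['#'] f (m - 1) r [] (cur.reverse :: acc) by
            simp [PySem.Chars.splitOnMax.go, hm, List.isPrefixOf]]
          rw [ih r (m - 1) [] (cur.reverse :: acc) (by simpa using Nat.lt_of_succ_lt_succ hf)]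
          simp
          omega
        · rw [show PySem.Chars.splitOnMax.go ['#'] (f + 1) m (c :: r) cur acc
              = PySem.Chars.splitOnMax.go ['#'] f m r (c :: cur) acc by
            simp [PySem.Chars.splitOnMax.go, hm, List.isPrefixOf, Ne.symm hc]]
          rw [ih r m (c :: cur) acc (by simpa using Nat.lt_of_succ_lt_succ hf)]
          simp [hc]

-- Main loop correspondence between A's scan and splitOnMax.go.
theorem main_lemma (datos : String) (l : List Char) (k s c : Nat) (j : Int)
    (acc : List (List Char)) (fuel : Nat)
    (hl : l = datos.toList.drop k) (hsk : s ≤ k) (hc : c < 3)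
    (hj : c ≠ 0 → j = (s : Int) - 1) (hs0 : c = 0 → s = 0)
    (hf : l.length < fuel) :
    separaDatosGo datos (PySem.List.enumerate l (k : Int)) (acc.reverse.map String.ofList) ((c : Int)) j
      = if 3 ≤ c + l.count '#'
        then (PySem.Chars.splitOnMax.go ['#'] fuel (3 - c) l
                (((datos.toList.drop s).take (k - s)).reverse) acc).map String.ofList
        else ((PySem.Chars.splitOnMax.go ['#'] fuel (3 - c) l
                (((datos.toList.drop s).take (k - s)).reverse) acc).map String.ofList).dropLast := by
  induction l generalizing k s c j acc fuel with
  | nil =>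
    have h3 : ¬ 3 ≤ c + List.count '#' ([] : List Char) := by simp; omega
    rw [if_neg h3]
    have hgo : PySem.Chars.splitOnMax.go ['#'] fuel (3 - c) []
        (((datos.toList.drop s).take (k - s)).reverse) acc
        = ((((datos.toList.drop s).take (k - s)).reverse).reverse :: acc).reverse := by
      cases fuel with
      | zero => simp [PySem.Chars.splitOnMax.go]
      | succ f => simp [PySem.Chars.splitOnMax.go]
    rw [hgo]
    simp [PySem.List.enumerate, separaDatosGo]
  | cons ch rest ih =>
    cases fuel with
    | zero => simp at hf
    | succ f =>
    have hf' : rest.length < f := by simpa using Nat.lt_of_succ_lt_succ hf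
    have hrest : rest = datos.toList.drop (k + 1) := by
      have := congrArg List.tail hl
      simpa [List.tail_drop] using this
    have hch : datos.toList[k]? = some ch := by
      have h0 : (datos.toList.drop k)[0]? = some ch := by rw [← hl]; simp
      simpa using h0
    have hseg : (datos.toList.drop s).take (k + 1 - s)
        = (datos.toList.drop s).take (k - s) ++ [ch] := by
      have : k + 1 - s = (k - s) + 1 := by omega
      rw [this, List.take_add_one]
      have : (datos.toList.drop s)[k - s]? = some ch := by
        rw [List.getElem?_drop]
        have : s + (k - s) = k := by omega
        rw [this, hch]
      simp [this]
    rw [PySem.List.enumerate_cons]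
    by_cases hc' : ch = '#'
    · subst hc'
      -- A takes the '#' branch
      have hmz : ¬ (3 - c) = 0 := by omega
      have hgo : PySem.Chars.splitOnMax.go ['#'] (f + 1) (3 - c) ('#' :: rest)
            (((datos.toList.drop s).take (k - s)).reverse) acc
          = PySem.Chars.splitOnMax.go ['#'] f (3 - c - 1) rest []
            ((((datos.toList.drop s).take (k - s)).reverse).reverse :: acc) := by
        simp [PySem.Chars.splitOnMax.go, hmz, List.isPrefixOf]
      have hcnt : List.count '#' ('#' :: rest) = List.count '#' rest + 1 := by
        simp
      by_cases hc0 : c = 0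
      · subst hc0
        have hs : s = 0 := hs0 rfl
        subst hs
        have hslice : PySem.Str.slice datos none (some (k : Int))
            = String.ofList ((datos.toList.drop 0).take (k - 0)) := by
          simp [PySem.Str.slice, PySem.List.slice_to_natCast]
        simp only [separaDatosGo, beq_self_eq_true, if_true]
        norm_num
        norm_num at hslice
        rw [hslice]
        have this0 := ih (k + 1) (k + 1) 1 ((k : Int) + 1 - 1) 
          ((((datos.toList.drop 0).take (k - 0)).reverse).reverse :: acc) f
          hrest (le_refl _) (by omega) (fun _ => by push_cast; ring) (by omega) hf'
        norm_num at hgo this0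
        push_cast at this0 ⊢
        rw [this0, hgo]
        by_cases h : 2 ≤ List.count '#' rest
        · rw [if_pos (by omega : 3 ≤ 1 + List.count '#' rest), if_pos h]
        · rw [if_neg (by omega : ¬ 3 ≤ 1 + List.count '#' rest), if_neg h]
      · -- c ≠ 0
        have hj' := hj hc0
        subst hj'
        have hslice : PySem.Str.slice datos (some ((s : Int) - 1 + 1)) (some (k : Int))
            = String.ofList ((datos.toList.drop s).take (k - s)) := by
          rw [show ((s : Int) - 1 + 1) = (s : Int) by ring]
          simp [PySem.Str.slice, PySem.List.slice_natCast]
        norm_num at hslice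
        by_cases hc2 : c = 2
        · subst hc2
          -- third '#': A appends the tail and stops; go hits m = 0
          simp only [separaDatosGo]
          norm_num
          rw [hslice]
          rw [hgo]
          rw [show (3 : Nat) - 2 - 1 = 0 by rfl]
          rw [go_m_zero]
          rw [if_pos (by omega : 3 ≤ 2 + (List.count '#' rest + 1))]
          have htail : PySem.Str.slice datos (some ((k : Int) + 1)) none
              = String.ofList (datos.toList.drop (k + 1)) := by
            have h0 : (0 : Int) ≤ (k : Int) + 1 := by omega
            have ht : ((k : Int) + 1).toNat = k + 1 := by omega
            simp [PySem.Str.slice, PySem.List.slice_from _ h0, ht]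
          rw [htail, ← hrest]
          simp
        · -- c = 1
          have hc1 : c = 1 := by omega
          subst hc1
          simp only [separaDatosGo]
          norm_num
          rw [hslice]
          have this0 := ih (k + 1) (k + 1) 2 ((k : Int)) 
            ((((datos.toList.drop s).take (k - s)).reverse).reverse :: acc) f
            hrest (le_refl _) (by omega) (fun _ => by push_cast; ring) (by omega) hf'
          norm_num at hgo this0
          rw [this0, hgo]
          by_cases h : 1 ≤ List.count '#' rest
          · rw [if_pos (by omega : 3 ≤ 2 + List.count '#' rest),
              if_pos (by omega : 3 ≤ 1 + (List.count '#' rest + 1))]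
          · rw [if_neg (by omega : ¬ 3 ≤ 2 + List.count '#' rest),
              if_neg (by omega : ¬ 3 ≤ 1 + (List.count '#' rest + 1))]
    · -- ch is not '#': both sides skip the character
      have hA : separaDatosGo datos (((k : Int), ch) :: PySem.List.enumerate rest ((k : Int) + 1))
            (acc.reverse.map String.ofList) ((c : Int)) j
          = separaDatosGo datos (PySem.List.enumerate rest ((k : Int) + 1))
            (acc.reverse.map String.ofList) ((c : Int)) j := by
        simp [separaDatosGo, hc']
      have hmz : ¬ (3 - c) = 0 := by omega
      have hgo : PySem.Chars.splitOnMax.go ['#'] (f + 1) (3 - c) (ch :: rest)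
            (((datos.toList.drop s).take (k - s)).reverse) acc
          = PySem.Chars.splitOnMax.go ['#'] f (3 - c) rest
            (ch :: ((datos.toList.drop s).take (k - s)).reverse) acc := by
        simp [PySem.Chars.splitOnMax.go, hmz, List.isPrefixOf, Ne.symm hc']
      rw [hA]
      have := ih (k + 1) s c j acc f hrest (by omega) hc hj hs0 hf'
      have hcur : ((datos.toList.drop s).take (k + 1 - s)).reverse
          = ch :: ((datos.toList.drop s).take (k - s)).reverse := by
        rw [hseg]; simp
      rw [hcur] at this
      push_cast at this ⊢
      rw [this, hgo]
      simp [hc']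

-- ===== VERDICT (by name: the statement is the Claim_ definition above) =====
theorem separaDatos_spec : Claim_equal_separaDatos := by
  intro datos _
  unfold Spec_separaDatos separaDatos separaDatos_alt
  have hmain := main_lemma datos datos.toList 0 0 0 0 [] (datos.toList.length + 1)
    (by simp) (le_refl 0) (by omega) (fun h => absurd rfl h) (fun _ => rfl) (by omega)
  norm_num at hmain
  have hB : PySem.Str.splitMax? datos "#" 3
      = some ((PySem.Chars.splitOnMax.go ['#'] (datos.toList.length + 1) 3 datos.toList [] []).map String.ofList) := by
    simp [PySem.Str.splitMax?, PySem.Chars.splitMax?, PySem.Chars.splitOnMax]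
  rw [hB]
  simp only [Option.getD_some]
  have hlen := go_length (datos.toList.length + 1) datos.toList 3 [] [] (by omega)
  simp only [String.length_toList] at hlen
  by_cases h : 3 ≤ List.count '#' datos.toList
  · rw [if_pos h] at hmain
    have h4 : ((PySem.Chars.splitOnMax.go ['#'] (datos.length + 1) 3 datos.toList [] []).map String.ofList).length = 4 := by
      simp [hlen]; omega
    rw [if_pos (by simp [h4])]
    exact hmain
  · rw [if_neg h] at hmain
    have h4 : ((PySem.Chars.splitOnMax.go ['#'] (datos.length + 1) 3 datos.toList [] []).map String.ofList).length ≠ 4 := by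
      simp [hlen]; omega
    rw [if_neg (by simpa using h4)]
    rw [PySem.List.slice_to_neg_one]
    exact hmain
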